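-- pv_equiv track=rewrite | github.com/timvoytko/Smiles-HeteroEncoder0-CML | utils.py | replace_atoms
-- ===== SOURCE A (Python) =====
-- def replace_atoms(smi, reverse=False):
--     if not reverse:
--         d = {'Br': 'X', 'Cl': 'Y', 'Se': 'Z', 'br': 'x', 'cl': 'y', 'se': 'z', '-]': 'V]'}
--     else:
--         d = {'X': 'Br', 'Y': 'Cl', 'Z': 'Se', 'x': 'br', 'y': 'cl', 'z': 'se', 'V]': '-]'}
--     new_smi = smi
--     for key in d:
--         new_smi = new_smi.replace(key, d[key])
--     return new_smi
-- ===== SOURCE B (Python) =====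
-- def replace_atoms(smi, reverse=False):
--     # single left-to-right scan instead of seven sequential .replace passes
--     if not reverse:
--         d = {'Br': 'X', 'Cl': 'Y', 'Se': 'Z', 'br': 'x', 'cl': 'y', 'se': 'z', '-]': 'V]'}
--         out = []
--         i = 0
--         while i < len(smi):
--             pair = smi[i:i + 2]
--             if pair in d:
--                 out.append(d[pair])
--                 i += 2
--             else:
--                 out.append(smi[i])
--                 i += 1
--     else:
--         d1 = {'X': 'Br', 'Y': 'Cl', 'Z': 'Se', 'x': 'br', 'y': 'cl', 'z': 'se'}
--         out = []
--         i = 0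
--         while i < len(smi):
--             if smi[i:i + 2] == 'V]':
--                 out.append('-]')
--                 i += 2
--             elif smi[i] in d1:
--                 out.append(d1[smi[i]])
--                 i += 1
--             else:
--                 out.append(smi[i])
--                 i += 1
--     return ''.join(out)
-- ===== Notes on version B (the rewrite author's own statement) =====
-- stated objective: alternative
-- what changed: A rewrites the whole string seven times, once per substitution token; B makes a single left-to-right scan, checking the two-character window (or one character, in reverse mode) against the substitution table at each position.
import Mathlib
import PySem

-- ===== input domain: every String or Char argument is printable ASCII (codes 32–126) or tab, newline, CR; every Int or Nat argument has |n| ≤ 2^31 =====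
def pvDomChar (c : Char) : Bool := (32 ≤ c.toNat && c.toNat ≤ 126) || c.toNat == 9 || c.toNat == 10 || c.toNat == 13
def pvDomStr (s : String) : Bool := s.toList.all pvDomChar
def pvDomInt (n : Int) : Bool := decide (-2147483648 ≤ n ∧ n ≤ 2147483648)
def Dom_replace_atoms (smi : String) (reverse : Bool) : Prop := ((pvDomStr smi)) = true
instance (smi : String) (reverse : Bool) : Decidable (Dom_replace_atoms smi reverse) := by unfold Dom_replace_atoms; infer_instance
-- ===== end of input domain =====

-- B replaces A's seven sequential .replace passes with a single left-to-right scan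
-- of the string against the substitution table (objective: alternative; the tokens
-- never overlap or cascade, so one pass yields the same string).

-- ===== PORT A =====
def replace_atoms (smi : String) (reverse : Bool) : String :=
  let d : List (String × String) :=
    if !reverse then
      [("Br", "X"), ("Cl", "Y"), ("Se", "Z"), ("br", "x"), ("cl", "y"), ("se", "z"), ("-]", "V]")]
    else
      [("X", "Br"), ("Y", "Cl"), ("Z", "Se"), ("x", "br"), ("y", "cl"), ("z", "se"), ("V]", "-]")]
  d.foldl (fun new_smi kv => PySem.Str.replace new_smi kv.1 kv.2) smi

-- ===== PORT B =====
-- B's forward scanner: at each position try the two-char token table, else copy one char.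
def scanFwd : List Char → List Char
  | 'B' :: 'r' :: t => 'X' :: scanFwd t
  | 'C' :: 'l' :: t => 'Y' :: scanFwd t
  | 'S' :: 'e' :: t => 'Z' :: scanFwd t
  | 'b' :: 'r' :: t => 'x' :: scanFwd t
  | 'c' :: 'l' :: t => 'y' :: scanFwd t
  | 's' :: 'e' :: t => 'z' :: scanFwd t
  | '-' :: ']' :: t => 'V' :: ']' :: scanFwd t
  | c :: t => c :: scanFwd t
  | [] => []

-- B's reverse scanner: 'V]' window first, then the single-char table, else copy.
def scanRev : List Char → List Char
  | 'V' :: ']' :: t => '-' :: ']' :: scanRev t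
  | 'X' :: t => 'B' :: 'r' :: scanRev t
  | 'Y' :: t => 'C' :: 'l' :: scanRev t
  | 'Z' :: t => 'S' :: 'e' :: scanRev t
  | 'x' :: t => 'b' :: 'r' :: scanRev t
  | 'y' :: t => 'c' :: 'l' :: scanRev t
  | 'z' :: t => 's' :: 'e' :: scanRev t
  | c :: t => c :: scanRev t
  | [] => []

def replace_atoms_alt (smi : String) (reverse : Bool) : String :=
  String.ofList (if reverse then scanRev smi.toList else scanFwd smi.toList)

-- ===== PRECONDITION & SPEC =====
def Spec_replace_atoms (smi : String) (reverse : Bool) (out : String) : Prop := out = replace_atoms_alt smi reverse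
instance (smi : String) (reverse : Bool) (out : String) : Decidable (Spec_replace_atoms smi reverse out) := by unfold Spec_replace_atoms; infer_instance

-- ===== CLAIM (what is proved, stated in full; the proofs are below) =====
def Claim_equal_replace_atoms : Prop := ∀ (smi : String) (reverse : Bool), Dom_replace_atoms smi reverse → Spec_replace_atoms smi reverse (replace_atoms smi reverse)

-- ===== LEMMAS AND PROOFS =====

-- structural characterisation of one `str.replace` pass (nonempty pattern)
def repG (old new : List Char) (l : List Char) : List Char :=
  match l with
  | [] => []
  | c :: t =>
    if h : old.isPrefixOf (c :: t) ∧ old ≠ [] then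
      new ++ repG old new (List.drop old.length (c :: t))
    else c :: repG old new t
termination_by l.length
decreasing_by
  · have h1 : 1 ≤ old.length := by cases old with | nil => simp at h | cons a k => simp
    have hlen := (List.isPrefixOf_iff_prefix.mp h.1).length_le
    simp only [List.length_drop, List.length_cons] at *
    omega
  · simp

theorem go_spec (old new : List Char) (hold : old ≠ []) :
    ∀ (fuel : Nat) (l acc : List Char), l.length ≤ fuel →
      PySem.Chars.replace.go old new fuel l acc = acc.reverse ++ repG old new l := by
  intro fuel
  induction fuel with
  | zero =>
    intro l acc hl
    have : l = [] := by cases l <;> simp_all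
    subst this
    simp [PySem.Chars.replace.go, repG]
  | succ n ih =>
    intro l acc hl
    cases l with
    | nil => simp [PySem.Chars.replace.go, repG]
    | cons c t =>
      rw [PySem.Chars.replace.go]
      by_cases hp : old.isPrefixOf (c :: t)
      · rw [if_pos hp]
        have h1 : 1 ≤ old.length := by cases old with | nil => simp at hold | cons a k => simp
        have hd : (List.drop old.length (c :: t)).length ≤ n := by
          simp only [List.length_drop, List.length_cons] at *
          omega
        rw [ih _ _ hd]
        rw [repG]
        rw [dif_pos ⟨hp, hold⟩]
        simp
      · rw [if_neg hp]
        have ht : t.length ≤ n := by simp at hl; omega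
        rw [ih _ _ ht]
        rw [repG]
        rw [dif_neg (by simp [hp])]
        simp

theorem replace_eq_repG (s old new : List Char) (hold : old ≠ []) :
    PySem.Chars.replace s old new = repG old new s := by
  rw [PySem.Chars.replace]
  rw [if_neg (by simp [hold])]
  exact go_spec old new hold s.length s [] le_rfl

-- one-step lemmas about repG
theorem repG_nil (old new : List Char) : repG old new [] = [] := by rw [repG]

theorem repG_pass2 (a b : Char) (new : List Char) (c : Char) (u : List Char)
    (h : c = a → u.head? ≠ some b) :
    repG [a, b] new (c :: u) = c :: repG [a, b] new u := by
  rw [repG]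
  rw [dif_neg]
  intro ⟨hp, _⟩
  cases u with
  | nil => simp [List.isPrefixOf] at hp
  | cons d v =>
    simp [List.isPrefixOf] at hp
    exact h hp.1.symm (by simp [hp.2.symm])

theorem repG_hit2 (a b : Char) (new : List Char) (t : List Char) :
    repG [a, b] new (a :: b :: t) = new ++ repG [a, b] new t := by
  rw [repG]
  rw [dif_pos (by simp [List.isPrefixOf])]
  simp

theorem repG_pass1 (a : Char) (new : List Char) (c : Char) (u : List Char) (h : c ≠ a) :
    repG [a] new (c :: u) = c :: repG [a] new u := by
  rw [repG]
  rw [dif_neg (by simp [List.isPrefixOf]; intro h'; exact absurd h'.symm h)]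

theorem repG_hit1 (a : Char) (new : List Char) (t : List Char) :
    repG [a] new (a :: t) = new ++ repG [a] new t := by
  rw [repG]
  rw [dif_pos (by simp [List.isPrefixOf])]
  simp

-- the head of a replaced list is the old head or the head of `new`
theorem head_ne (old new : List Char) (z : Char) (u : List Char)
    (hnew : new ≠ []) (h1 : u.head? ≠ some z) (h2 : new.head? ≠ some z) :
    (repG old new u).head? ≠ some z := by
  cases u with
  | nil => simp [repG_nil]
  | cons c t =>
    rw [repG]
    split
    · cases new with
      | nil => exact absurd rfl hnew
      | cons n0 nv => simpa using h2
    · simpa using h1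


theorem neq_imp {c a : Char} {P : Prop} (h : ¬ c = a) : c = a → P :=
  fun hh => absurd hh h

theorem fwd_comp (s : List Char) :
    repG ['-', ']'] ['V', ']'] (repG ['s', 'e'] ['z'] (repG ['c', 'l'] ['y'] (repG ['b', 'r'] ['x'] (repG ['S', 'e'] ['Z'] (repG ['C', 'l'] ['Y'] (repG ['B', 'r'] ['X'] s)))))) = scanFwd s := by
  fun_induction scanFwd s with
  | case1 t ih =>
    rw [repG_hit2 'B' 'r' ['X'] _]
    simp only [List.cons_append, List.nil_append]
    rw [repG_pass2 'C' 'l' ['Y'] 'X' _ (neq_imp (by decide))]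
    rw [repG_pass2 'S' 'e' ['Z'] 'X' _ (neq_imp (by decide))]
    rw [repG_pass2 'b' 'r' ['x'] 'X' _ (neq_imp (by decide))]
    rw [repG_pass2 'c' 'l' ['y'] 'X' _ (neq_imp (by decide))]
    rw [repG_pass2 's' 'e' ['z'] 'X' _ (neq_imp (by decide))]
    rw [repG_pass2 '-' ']' ['V', ']'] 'X' _ (neq_imp (by decide))]
    rw [ih]
  | case2 t ih =>
    rw [repG_pass2 'B' 'r' ['X'] 'C' _ (neq_imp (by decide))]
    rw [repG_pass2 'B' 'r' ['X'] 'l' _ (neq_imp (by decide))]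
    rw [repG_hit2 'C' 'l' ['Y'] _]
    simp only [List.cons_append, List.nil_append]
    rw [repG_pass2 'S' 'e' ['Z'] 'Y' _ (neq_imp (by decide))]
    rw [repG_pass2 'b' 'r' ['x'] 'Y' _ (neq_imp (by decide))]
    rw [repG_pass2 'c' 'l' ['y'] 'Y' _ (neq_imp (by decide))]
    rw [repG_pass2 's' 'e' ['z'] 'Y' _ (neq_imp (by decide))]
    rw [repG_pass2 '-' ']' ['V', ']'] 'Y' _ (neq_imp (by decide))]
    rw [ih]
  | case3 t ih =>
    rw [repG_pass2 'B' 'r' ['X'] 'S' _ (neq_imp (by decide))]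
    rw [repG_pass2 'B' 'r' ['X'] 'e' _ (neq_imp (by decide))]
    rw [repG_pass2 'C' 'l' ['Y'] 'S' _ (neq_imp (by decide))]
    rw [repG_pass2 'C' 'l' ['Y'] 'e' _ (neq_imp (by decide))]
    rw [repG_hit2 'S' 'e' ['Z'] _]
    simp only [List.cons_append, List.nil_append]
    rw [repG_pass2 'b' 'r' ['x'] 'Z' _ (neq_imp (by decide))]
    rw [repG_pass2 'c' 'l' ['y'] 'Z' _ (neq_imp (by decide))]
    rw [repG_pass2 's' 'e' ['z'] 'Z' _ (neq_imp (by decide))]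
    rw [repG_pass2 '-' ']' ['V', ']'] 'Z' _ (neq_imp (by decide))]
    rw [ih]
  | case4 t ih =>
    rw [repG_pass2 'B' 'r' ['X'] 'b' _ (neq_imp (by decide))]
    rw [repG_pass2 'B' 'r' ['X'] 'r' _ (neq_imp (by decide))]
    rw [repG_pass2 'C' 'l' ['Y'] 'b' _ (neq_imp (by decide))]
    rw [repG_pass2 'C' 'l' ['Y'] 'r' _ (neq_imp (by decide))]
    rw [repG_pass2 'S' 'e' ['Z'] 'b' _ (neq_imp (by decide))]
    rw [repG_pass2 'S' 'e' ['Z'] 'r' _ (neq_imp (by decide))]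
    rw [repG_hit2 'b' 'r' ['x'] _]
    simp only [List.cons_append, List.nil_append]
    rw [repG_pass2 'c' 'l' ['y'] 'x' _ (neq_imp (by decide))]
    rw [repG_pass2 's' 'e' ['z'] 'x' _ (neq_imp (by decide))]
    rw [repG_pass2 '-' ']' ['V', ']'] 'x' _ (neq_imp (by decide))]
    rw [ih]
  | case5 t ih =>
    rw [repG_pass2 'B' 'r' ['X'] 'c' _ (neq_imp (by decide))]
    rw [repG_pass2 'B' 'r' ['X'] 'l' _ (neq_imp (by decide))]
    rw [repG_pass2 'C' 'l' ['Y'] 'c' _ (neq_imp (by decide))]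
    rw [repG_pass2 'C' 'l' ['Y'] 'l' _ (neq_imp (by decide))]
    rw [repG_pass2 'S' 'e' ['Z'] 'c' _ (neq_imp (by decide))]
    rw [repG_pass2 'S' 'e' ['Z'] 'l' _ (neq_imp (by decide))]
    rw [repG_pass2 'b' 'r' ['x'] 'c' _ (neq_imp (by decide))]
    rw [repG_pass2 'b' 'r' ['x'] 'l' _ (neq_imp (by decide))]
    rw [repG_hit2 'c' 'l' ['y'] _]
    simp only [List.cons_append, List.nil_append]
    rw [repG_pass2 's' 'e' ['z'] 'y' _ (neq_imp (by decide))]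
    rw [repG_pass2 '-' ']' ['V', ']'] 'y' _ (neq_imp (by decide))]
    rw [ih]
  | case6 t ih =>
    rw [repG_pass2 'B' 'r' ['X'] 's' _ (neq_imp (by decide))]
    rw [repG_pass2 'B' 'r' ['X'] 'e' _ (neq_imp (by decide))]
    rw [repG_pass2 'C' 'l' ['Y'] 's' _ (neq_imp (by decide))]
    rw [repG_pass2 'C' 'l' ['Y'] 'e' _ (neq_imp (by decide))]
    rw [repG_pass2 'S' 'e' ['Z'] 's' _ (neq_imp (by decide))]
    rw [repG_pass2 'S' 'e' ['Z'] 'e' _ (neq_imp (by decide))]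
    rw [repG_pass2 'b' 'r' ['x'] 's' _ (neq_imp (by decide))]
    rw [repG_pass2 'b' 'r' ['x'] 'e' _ (neq_imp (by decide))]
    rw [repG_pass2 'c' 'l' ['y'] 's' _ (neq_imp (by decide))]
    rw [repG_pass2 'c' 'l' ['y'] 'e' _ (neq_imp (by decide))]
    rw [repG_hit2 's' 'e' ['z'] _]
    simp only [List.cons_append, List.nil_append]
    rw [repG_pass2 '-' ']' ['V', ']'] 'z' _ (neq_imp (by decide))]
    rw [ih]
  | case7 t ih =>
    rw [repG_pass2 'B' 'r' ['X'] '-' _ (neq_imp (by decide))]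
    rw [repG_pass2 'B' 'r' ['X'] ']' _ (neq_imp (by decide))]
    rw [repG_pass2 'C' 'l' ['Y'] '-' _ (neq_imp (by decide))]
    rw [repG_pass2 'C' 'l' ['Y'] ']' _ (neq_imp (by decide))]
    rw [repG_pass2 'S' 'e' ['Z'] '-' _ (neq_imp (by decide))]
    rw [repG_pass2 'S' 'e' ['Z'] ']' _ (neq_imp (by decide))]
    rw [repG_pass2 'b' 'r' ['x'] '-' _ (neq_imp (by decide))]
    rw [repG_pass2 'b' 'r' ['x'] ']' _ (neq_imp (by decide))]
    rw [repG_pass2 'c' 'l' ['y'] '-' _ (neq_imp (by decide))]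
    rw [repG_pass2 'c' 'l' ['y'] ']' _ (neq_imp (by decide))]
    rw [repG_pass2 's' 'e' ['z'] '-' _ (neq_imp (by decide))]
    rw [repG_pass2 's' 'e' ['z'] ']' _ (neq_imp (by decide))]
    rw [repG_hit2 '-' ']' ['V', ']'] _]
    simp only [List.cons_append, List.nil_append]
    rw [ih]
  | case8 c t h1 h2 h3 h4 h5 h6 h7 ih =>
    have hB : c = 'B' → t.head? ≠ some 'r' := by
      intro h hh; cases t with
      | nil => simp at hh
      | cons d v => simp only [List.head?_cons, Option.some.injEq] at hh; exact h1 v h (by rw [hh])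
    have hC : c = 'C' → t.head? ≠ some 'l' := by
      intro h hh; cases t with
      | nil => simp at hh
      | cons d v => simp only [List.head?_cons, Option.some.injEq] at hh; exact h2 v h (by rw [hh])
    have hS : c = 'S' → t.head? ≠ some 'e' := by
      intro h hh; cases t with
      | nil => simp at hh
      | cons d v => simp only [List.head?_cons, Option.some.injEq] at hh; exact h3 v h (by rw [hh])
    have hb2 : c = 'b' → t.head? ≠ some 'r' := by
      intro h hh; cases t with
      | nil => simp at hh
      | cons d v => simp only [List.head?_cons, Option.some.injEq] at hh; exact h4 v h (by rw [hh])
    have hc2 : c = 'c' → t.head? ≠ some 'l' := by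
      intro h hh; cases t with
      | nil => simp at hh
      | cons d v => simp only [List.head?_cons, Option.some.injEq] at hh; exact h5 v h (by rw [hh])
    have hs2 : c = 's' → t.head? ≠ some 'e' := by
      intro h hh; cases t with
      | nil => simp at hh
      | cons d v => simp only [List.head?_cons, Option.some.injEq] at hh; exact h6 v h (by rw [hh])
    have hd : c = '-' → t.head? ≠ some ']' := by
      intro h hh; cases t with
      | nil => simp at hh
      | cons d v => simp only [List.head?_cons, Option.some.injEq] at hh; exact h7 v h (by rw [hh])
    rw [repG_pass2 'B' 'r' ['X'] c _ hB]
    rw [repG_pass2 'C' 'l' ['Y'] c _ (fun h => (head_ne _ _ _ _ (by decide) (hC h) (by decide)))]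
    rw [repG_pass2 'S' 'e' ['Z'] c _ (fun h => (head_ne _ _ _ _ (by decide) (head_ne _ _ _ _ (by decide) (hS h) (by decide)) (by decide)))]
    rw [repG_pass2 'b' 'r' ['x'] c _ (fun h => (head_ne _ _ _ _ (by decide) (head_ne _ _ _ _ (by decide) (head_ne _ _ _ _ (by decide) (hb2 h) (by decide)) (by decide)) (by decide)))]
    rw [repG_pass2 'c' 'l' ['y'] c _ (fun h => (head_ne _ _ _ _ (by decide) (head_ne _ _ _ _ (by decide) (head_ne _ _ _ _ (by decide) (head_ne _ _ _ _ (by decide) (hc2 h) (by decide)) (by decide)) (by decide)) (by decide)))]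
    rw [repG_pass2 's' 'e' ['z'] c _ (fun h => (head_ne _ _ _ _ (by decide) (head_ne _ _ _ _ (by decide) (head_ne _ _ _ _ (by decide) (head_ne _ _ _ _ (by decide) (head_ne _ _ _ _ (by decide) (hs2 h) (by decide)) (by decide)) (by decide)) (by decide)) (by decide)))]
    rw [repG_pass2 '-' ']' ['V', ']'] c _ (fun h => (head_ne _ _ _ _ (by decide) (head_ne _ _ _ _ (by decide) (head_ne _ _ _ _ (by decide) (head_ne _ _ _ _ (by decide) (head_ne _ _ _ _ (by decide) (head_ne _ _ _ _ (by decide) (hd h) (by decide)) (by decide)) (by decide)) (by decide)) (by decide)) (by decide)))]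
    rw [ih]
  | case9 => simp [repG_nil]

theorem rev_comp (s : List Char) :
    repG ['V', ']'] ['-', ']'] (repG ['z'] ['s', 'e'] (repG ['y'] ['c', 'l'] (repG ['x'] ['b', 'r'] (repG ['Z'] ['S', 'e'] (repG ['Y'] ['C', 'l'] (repG ['X'] ['B', 'r'] s)))))) = scanRev s := by
  fun_induction scanRev s with
  | case1 t ih =>
    rw [repG_pass1 'X' ['B', 'r'] 'V' _ (by decide)]
    rw [repG_pass1 'X' ['B', 'r'] ']' _ (by decide)]
    rw [repG_pass1 'Y' ['C', 'l'] 'V' _ (by decide)]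
    rw [repG_pass1 'Y' ['C', 'l'] ']' _ (by decide)]
    rw [repG_pass1 'Z' ['S', 'e'] 'V' _ (by decide)]
    rw [repG_pass1 'Z' ['S', 'e'] ']' _ (by decide)]
    rw [repG_pass1 'x' ['b', 'r'] 'V' _ (by decide)]
    rw [repG_pass1 'x' ['b', 'r'] ']' _ (by decide)]
    rw [repG_pass1 'y' ['c', 'l'] 'V' _ (by decide)]
    rw [repG_pass1 'y' ['c', 'l'] ']' _ (by decide)]
    rw [repG_pass1 'z' ['s', 'e'] 'V' _ (by decide)]
    rw [repG_pass1 'z' ['s', 'e'] ']' _ (by decide)]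
    rw [repG_hit2 'V' ']' ['-', ']'] _]
    simp only [List.cons_append, List.nil_append]
    rw [ih]
  | case2 t ih =>
    rw [repG_hit1 'X' ['B', 'r'] _]
    simp only [List.cons_append, List.nil_append]
    rw [repG_pass1 'Y' ['C', 'l'] 'B' _ (by decide)]
    rw [repG_pass1 'Y' ['C', 'l'] 'r' _ (by decide)]
    rw [repG_pass1 'Z' ['S', 'e'] 'B' _ (by decide)]
    rw [repG_pass1 'Z' ['S', 'e'] 'r' _ (by decide)]
    rw [repG_pass1 'x' ['b', 'r'] 'B' _ (by decide)]
    rw [repG_pass1 'x' ['b', 'r'] 'r' _ (by decide)]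
    rw [repG_pass1 'y' ['c', 'l'] 'B' _ (by decide)]
    rw [repG_pass1 'y' ['c', 'l'] 'r' _ (by decide)]
    rw [repG_pass1 'z' ['s', 'e'] 'B' _ (by decide)]
    rw [repG_pass1 'z' ['s', 'e'] 'r' _ (by decide)]
    rw [repG_pass2 'V' ']' ['-', ']'] 'B' _ (neq_imp (by decide))]
    rw [repG_pass2 'V' ']' ['-', ']'] 'r' _ (neq_imp (by decide))]
    rw [ih]
  | case3 t ih =>
    rw [repG_pass1 'X' ['B', 'r'] 'Y' _ (by decide)]
    rw [repG_hit1 'Y' ['C', 'l'] _]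
    simp only [List.cons_append, List.nil_append]
    rw [repG_pass1 'Z' ['S', 'e'] 'C' _ (by decide)]
    rw [repG_pass1 'Z' ['S', 'e'] 'l' _ (by decide)]
    rw [repG_pass1 'x' ['b', 'r'] 'C' _ (by decide)]
    rw [repG_pass1 'x' ['b', 'r'] 'l' _ (by decide)]
    rw [repG_pass1 'y' ['c', 'l'] 'C' _ (by decide)]
    rw [repG_pass1 'y' ['c', 'l'] 'l' _ (by decide)]
    rw [repG_pass1 'z' ['s', 'e'] 'C' _ (by decide)]
    rw [repG_pass1 'z' ['s', 'e'] 'l' _ (by decide)]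
    rw [repG_pass2 'V' ']' ['-', ']'] 'C' _ (neq_imp (by decide))]
    rw [repG_pass2 'V' ']' ['-', ']'] 'l' _ (neq_imp (by decide))]
    rw [ih]
  | case4 t ih =>
    rw [repG_pass1 'X' ['B', 'r'] 'Z' _ (by decide)]
    rw [repG_pass1 'Y' ['C', 'l'] 'Z' _ (by decide)]
    rw [repG_hit1 'Z' ['S', 'e'] _]
    simp only [List.cons_append, List.nil_append]
    rw [repG_pass1 'x' ['b', 'r'] 'S' _ (by decide)]
    rw [repG_pass1 'x' ['b', 'r'] 'e' _ (by decide)]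
    rw [repG_pass1 'y' ['c', 'l'] 'S' _ (by decide)]
    rw [repG_pass1 'y' ['c', 'l'] 'e' _ (by decide)]
    rw [repG_pass1 'z' ['s', 'e'] 'S' _ (by decide)]
    rw [repG_pass1 'z' ['s', 'e'] 'e' _ (by decide)]
    rw [repG_pass2 'V' ']' ['-', ']'] 'S' _ (neq_imp (by decide))]
    rw [repG_pass2 'V' ']' ['-', ']'] 'e' _ (neq_imp (by decide))]
    rw [ih]
  | case5 t ih =>
    rw [repG_pass1 'X' ['B', 'r'] 'x' _ (by decide)]
    rw [repG_pass1 'Y' ['C', 'l'] 'x' _ (by decide)]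
    rw [repG_pass1 'Z' ['S', 'e'] 'x' _ (by decide)]
    rw [repG_hit1 'x' ['b', 'r'] _]
    simp only [List.cons_append, List.nil_append]
    rw [repG_pass1 'y' ['c', 'l'] 'b' _ (by decide)]
    rw [repG_pass1 'y' ['c', 'l'] 'r' _ (by decide)]
    rw [repG_pass1 'z' ['s', 'e'] 'b' _ (by decide)]
    rw [repG_pass1 'z' ['s', 'e'] 'r' _ (by decide)]
    rw [repG_pass2 'V' ']' ['-', ']'] 'b' _ (neq_imp (by decide))]
    rw [repG_pass2 'V' ']' ['-', ']'] 'r' _ (neq_imp (by decide))]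
    rw [ih]
  | case6 t ih =>
    rw [repG_pass1 'X' ['B', 'r'] 'y' _ (by decide)]
    rw [repG_pass1 'Y' ['C', 'l'] 'y' _ (by decide)]
    rw [repG_pass1 'Z' ['S', 'e'] 'y' _ (by decide)]
    rw [repG_pass1 'x' ['b', 'r'] 'y' _ (by decide)]
    rw [repG_hit1 'y' ['c', 'l'] _]
    simp only [List.cons_append, List.nil_append]
    rw [repG_pass1 'z' ['s', 'e'] 'c' _ (by decide)]
    rw [repG_pass1 'z' ['s', 'e'] 'l' _ (by decide)]
    rw [repG_pass2 'V' ']' ['-', ']'] 'c' _ (neq_imp (by decide))]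
    rw [repG_pass2 'V' ']' ['-', ']'] 'l' _ (neq_imp (by decide))]
    rw [ih]
  | case7 t ih =>
    rw [repG_pass1 'X' ['B', 'r'] 'z' _ (by decide)]
    rw [repG_pass1 'Y' ['C', 'l'] 'z' _ (by decide)]
    rw [repG_pass1 'Z' ['S', 'e'] 'z' _ (by decide)]
    rw [repG_pass1 'x' ['b', 'r'] 'z' _ (by decide)]
    rw [repG_pass1 'y' ['c', 'l'] 'z' _ (by decide)]
    rw [repG_hit1 'z' ['s', 'e'] _]
    simp only [List.cons_append, List.nil_append]
    rw [repG_pass2 'V' ']' ['-', ']'] 's' _ (neq_imp (by decide))]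
    rw [repG_pass2 'V' ']' ['-', ']'] 'e' _ (neq_imp (by decide))]
    rw [ih]
  | case8 c t h1 h2 h3 h4 h5 h6 h7 ih =>
    have hV : c = 'V' → t.head? ≠ some ']' := by
      intro h hh; cases t with
      | nil => simp at hh
      | cons d v => simp only [List.head?_cons, Option.some.injEq] at hh; exact h1 v h (by rw [hh])
    rw [repG_pass1 'X' ['B', 'r'] c _ (fun hh => h2 hh)]
    rw [repG_pass1 'Y' ['C', 'l'] c _ (fun hh => h3 hh)]
    rw [repG_pass1 'Z' ['S', 'e'] c _ (fun hh => h4 hh)]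
    rw [repG_pass1 'x' ['b', 'r'] c _ (fun hh => h5 hh)]
    rw [repG_pass1 'y' ['c', 'l'] c _ (fun hh => h6 hh)]
    rw [repG_pass1 'z' ['s', 'e'] c _ (fun hh => h7 hh)]
    rw [repG_pass2 'V' ']' ['-', ']'] c _ (fun h => (head_ne _ _ _ _ (by decide) (head_ne _ _ _ _ (by decide) (head_ne _ _ _ _ (by decide) (head_ne _ _ _ _ (by decide) (head_ne _ _ _ _ (by decide) (head_ne _ _ _ _ (by decide) (hV h) (by decide)) (by decide)) (by decide)) (by decide)) (by decide)) (by decide)))]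
    rw [ih]
  | case9 => simp [repG_nil]


-- ===== VERDICT (by name: the statement is the Claim_ definition above) =====
set_option maxHeartbeats 1000000 in
theorem replace_atoms_spec : Claim_equal_replace_atoms := by
  intro smi reverse _
  unfold Spec_replace_atoms replace_atoms replace_atoms_alt
  cases reverse with
  | false =>
    simp only [Bool.not_false, if_true, List.foldl, PySem.Str.replace, String.toList_ofList]
    refine congrArg String.ofList ?_
    rw [replace_eq_repG _ _ _ (by decide), replace_eq_repG _ _ _ (by decide),
        replace_eq_repG _ _ _ (by decide), replace_eq_repG _ _ _ (by decide),
        replace_eq_repG _ _ _ (by decide), replace_eq_repG _ _ _ (by decide),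
        replace_eq_repG _ _ _ (by decide)]
    exact fwd_comp smi.toList
  | true =>
    simp only [Bool.not_true, Bool.false_eq_true, if_false, List.foldl, PySem.Str.replace, String.toList_ofList]
    refine congrArg String.ofList ?_
    rw [replace_eq_repG _ _ _ (by decide), replace_eq_repG _ _ _ (by decide),
        replace_eq_repG _ _ _ (by decide), replace_eq_repG _ _ _ (by decide),
        replace_eq_repG _ _ _ (by decide), replace_eq_repG _ _ _ (by decide),
        replace_eq_repG _ _ _ (by decide)]
    exact rev_comp smi.toList
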